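-- pv_equiv track=rewrite | github.com/devjeetroy98/Data-Structure-using-Python | DS using Python/arrays/code9.py | findSwap
-- ===== SOURCE A (Python) =====
-- def findSwap(arr, k):
--     n = len(arr)
--     counter = 0
--     bad = 0
--     for i in arr:
--         if i <= k:
--             counter+=1
--
--     try:
--         j = 0
--         minx = 0
--         ans1 = 9999
--         for i in range(n):
--             temp = arr[j:j+counter]
--             for it in temp:
--                 if it > k:
--                     minx += 1
--             ans1 = min([ans1, minx])
--     except:
--         pass
--
--     arr = arr[::-1]
--
--     try:
--         j = 0
--         minx = 0
--         ans2 = 9999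
--         for i in range(n):
--             temp = arr[j:j+counter]
--             for it in temp:
--                 if it > k:
--                     minx += 1
--             ans2 = min([ans2, minx])
--     except:
--         pass
--
--     return min([ans1,ans2])
-- ===== SOURCE B (Python) =====
-- def findSwap(arr, k):
--     counter = sum(1 for x in arr if x <= k)
--     if not arr:
--         return 9999
--     bad_first = sum(1 for x in arr[:counter] if x > k)
--     bad_last = sum(1 for x in arr[len(arr) - counter:] if x > k)
--     return min(9999, bad_first, bad_last)
-- ===== Notes on version B (the rewrite author's own statement) =====
-- stated objective: faster
-- what changed: A's two loops re-scan the same fixed window arr[0:counter] (j never advances) n times while minx accumulates, so each ans is just min(9999, bad-count of the first window of the (possibly reversed) array); B computes the two window counts directly in one pass each with no outer loop.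
import Mathlib
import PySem

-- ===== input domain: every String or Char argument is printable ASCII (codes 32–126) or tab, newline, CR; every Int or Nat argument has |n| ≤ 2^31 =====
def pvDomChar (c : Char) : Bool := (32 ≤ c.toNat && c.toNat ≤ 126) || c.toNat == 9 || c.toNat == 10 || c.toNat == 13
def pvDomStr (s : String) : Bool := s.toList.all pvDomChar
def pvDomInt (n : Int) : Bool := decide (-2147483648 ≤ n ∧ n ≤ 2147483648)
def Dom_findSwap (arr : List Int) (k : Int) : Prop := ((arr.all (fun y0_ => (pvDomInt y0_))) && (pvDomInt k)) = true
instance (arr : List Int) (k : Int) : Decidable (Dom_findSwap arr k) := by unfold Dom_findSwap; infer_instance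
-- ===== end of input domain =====

-- B replaces A's quadratic accumulate-and-min loops (whose window arr[j:j+counter] is fixed,
-- since j never changes) by two direct counts over the first/last window; equal return values.

-- ===== PORT A =====
-- one iteration of A's 'for i in range(n)' loops: state (minx, ans)
def findSwapStep (arr : List Int) (k : Int) (counter : Int) (p : Int × Int) : Int × Int :=
  let temp := PySem.List.slice arr (some 0) (some (0 + counter))
  let minx := temp.foldl (fun m it => if it > k then m + 1 else m) p.1
  (minx, min p.2 minx)

def findSwap (arr : List Int) (k : Int) : Int :=
  let n : Int := (arr.length : Int)
  let counter : Int := arr.foldl (fun c i => if i ≤ k then c + 1 else c) 0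
  let s1 := (PySem.List.pyRange 0 n 1).foldl (fun p _ => findSwapStep arr k counter p) (0, 9999)
  let ans1 := s1.2
  let arr2 := arr.reverse    -- arr = arr[::-1]
  let s2 := (PySem.List.pyRange 0 n 1).foldl (fun p _ => findSwapStep arr2 k counter p) (0, 9999)
  let ans2 := s2.2
  min ans1 ans2

-- ===== PORT B =====
def findSwap_alt (arr : List Int) (k : Int) : Int :=
  let counter : Int := ((arr.countP (fun x => decide (x ≤ k))) : Int)
  if arr = [] then 9999
  else
    let badFirst : Int := ((PySem.List.slice arr none (some counter)).countP (fun x => decide (k < x)) : Int)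
    let badLast : Int := ((PySem.List.slice arr (some ((arr.length : Int) - counter)) none).countP (fun x => decide (k < x)) : Int)
    min 9999 (min badFirst badLast)

-- ===== PRECONDITION & SPEC =====
def Spec_findSwap (arr : List Int) (k : Int) (out : Int) : Prop := out = findSwap_alt arr k
instance (arr : List Int) (k : Int) (out : Int) : Decidable (Spec_findSwap arr k out) := by unfold Spec_findSwap; infer_instance

-- ===== CLAIM (what is proved, stated in full; the proofs are below) =====
def Claim_equal_findSwap : Prop := ∀ (arr : List Int) (k : Int), Dom_findSwap arr k → Spec_findSwap arr k (findSwap arr k)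

-- ===== LEMMAS AND PROOFS =====

-- the bad-count of the (fixed) window A scans in every iteration
def pvBadC (arr : List Int) (k : Int) (counter : Int) : Int :=
  ((PySem.List.slice arr (some 0) (some (0 + counter))).countP (fun x => decide (k < x)) : Int)

theorem pvBadC_nonneg (arr : List Int) (k counter : Int) : 0 ≤ pvBadC arr k counter := by
  exact Int.natCast_nonneg _

theorem findSwapStep_eq (arr : List Int) (k counter : Int) (p : Int × Int) :
    findSwapStep arr k counter p = (p.1 + pvBadC arr k counter, min p.2 (p.1 + pvBadC arr k counter)) := by
  simp [findSwapStep, pvBadC, PySem.List.foldl_ite_add_one]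

-- once ans ≤ minx + c, further iterations (each adding c ≥ 0 to minx) never lower ans
theorem pvFold_min (arr : List Int) (k counter : Int) (l : List Int) (m a : Int)
    (hm : 0 ≤ m) (ha : a ≤ m + pvBadC arr k counter) :
    (l.foldl (fun p (_ : Int) => findSwapStep arr k counter p) (m, a)).2 = a := by
  induction l generalizing m a with
  | nil => rfl
  | cons x t ih =>
    have hc := pvBadC_nonneg arr k counter
    rw [List.foldl_cons, findSwapStep_eq]
    have hmin : min a (m + pvBadC arr k counter) = a := min_eq_left ha
    rw [hmin]
    exact ih (m + pvBadC arr k counter) a (by omega) (by omega)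

-- each of A's two loops returns min 9999 (bad-count of its fixed window) on a nonempty array
theorem pvLoop_eq (arr : List Int) (k counter : Int) (n : Int) (hn : 0 < n) :
    ((PySem.List.pyRange 0 n 1).foldl (fun p (_ : Int) => findSwapStep arr k counter p) (0, 9999)).2
      = min 9999 (pvBadC arr k counter) := by
  rw [PySem.List.pyRange_one_cons hn, List.foldl_cons, findSwapStep_eq]
  have hc := pvBadC_nonneg arr k counter
  rw [pvFold_min arr k counter _ _ _ (by omega) (by simp; omega)]
  simp

theorem findSwap_spec' (arr : List Int) (k : Int) : findSwap arr k = findSwap_alt arr k := by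
  rcases eq_or_ne arr [] with rfl | hne
  · simp [findSwap, findSwap_alt, PySem.List.pyRange_one_eq_nil, findSwapStep]
  · have hn : 0 < (arr.length : Int) := by
      have : arr.length ≠ 0 := fun h => hne (List.length_eq_zero_iff.mp h)
      omega
    have hcnt : arr.foldl (fun c i => if i ≤ k then c + 1 else c) 0
        = ((arr.countP (fun x => decide (x ≤ k)) : Nat) : Int) := by
      rw [PySem.List.foldl_ite_add_one]; simp
    have hle : arr.countP (fun x => decide (x ≤ k)) ≤ arr.length := List.countP_le_length
    unfold findSwap findSwap_alt
    rw [if_neg hne]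
    simp only [hcnt, pvLoop_eq _ _ _ _ hn]
    -- identify the two window bad-counts with B's
    have h1 : pvBadC arr k ((arr.countP (fun x => decide (x ≤ k)) : Nat) : Int)
        = ((PySem.List.slice arr none (some ((arr.countP (fun x => decide (x ≤ k)) : Nat) : Int))).countP (fun x => decide (k < x)) : Int) := by
      simp [pvBadC]
    have h2 : pvBadC arr.reverse k ((arr.countP (fun x => decide (x ≤ k)) : Nat) : Int)
        = ((PySem.List.slice arr (some ((arr.length : Int) - ((arr.countP (fun x => decide (x ≤ k)) : Nat) : Int))) none).countP
            (fun x => decide (k < x)) : Int) := by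
      have hcast : (arr.length : Int) - ((arr.countP (fun x => decide (x ≤ k)) : Nat) : Int)
          = (((arr.length - arr.countP (fun x => decide (x ≤ k)) : Nat)) : Int) := by omega
      rw [hcast, PySem.List.slice_from_natCast]
      simp [pvBadC, PySem.List.slice_to_natCast, List.take_reverse, List.countP_reverse]
    rw [h1, h2]
    omega

-- ===== VERDICT (by name: the statement is the Claim_ definition above) =====
theorem findSwap_spec : Claim_equal_findSwap := by
  intro arr k _
  unfold Spec_findSwap
  exact findSwap_spec' arr k
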